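-- pv_equiv track=rewrite | github.com/Golo258/ProjectsHub | sql/cursor_connection.py | get_sub_query
-- ===== SOURCE A (Python) =====
-- def get_sub_query(queries, fun_use):
--     sub_query = []
--     is_multiple_line_query = False
--     for line in queries.splitlines():
--         current_line = line.strip()
--         if (current_line.startswith("-- QUERY")
--                 and fun_use in current_line
--                 or is_multiple_line_query):
--             is_multiple_line_query = True if not current_line.endswith(";") else False
--             sub_query.append(current_line)
--
--     return "\n".join(sub_query)
-- ===== SOURCE B (Python) =====
-- def get_sub_query(queries, fun_use):
--     lines = [line.strip() for line in queries.splitlines()]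
--     out = []
--     i = 0
--     n = len(lines)
--     while i < n:
--         cur = lines[i]
--         i += 1
--         if cur.startswith("-- QUERY") and fun_use in cur:
--             out.append(cur)
--             if not cur.endswith(";"):
--                 # continuation: copy lines until one ends with ';' (or EOF)
--                 while i < n:
--                     cont = lines[i]
--                     i += 1
--                     out.append(cont)
--                     if cont.endswith(";"):
--                         break
--     return "\n".join(out)
-- ===== Notes on version B (the rewrite author's own statement) =====
-- stated objective: alternative
-- what changed: Replaces the boolean state-machine flag over a single flat scan with an explicit index and a nested header-then-continuation loop: the outer loop finds matching '-- QUERY' headers, an inner loop copies continuation lines up to the terminating ';'.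
import Mathlib
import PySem

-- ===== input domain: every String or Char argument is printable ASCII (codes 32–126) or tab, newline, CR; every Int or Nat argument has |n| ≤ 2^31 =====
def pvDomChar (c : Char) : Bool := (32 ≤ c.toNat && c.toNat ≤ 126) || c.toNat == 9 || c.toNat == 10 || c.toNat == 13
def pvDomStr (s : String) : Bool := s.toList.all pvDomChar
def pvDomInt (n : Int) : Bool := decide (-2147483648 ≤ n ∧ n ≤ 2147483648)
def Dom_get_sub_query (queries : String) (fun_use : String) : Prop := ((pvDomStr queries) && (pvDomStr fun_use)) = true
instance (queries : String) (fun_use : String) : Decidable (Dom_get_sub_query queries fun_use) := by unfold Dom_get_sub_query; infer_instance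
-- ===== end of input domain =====

-- B replaces A's boolean state-machine scan with an explicit header scan plus a nested continuation loop (alternative decomposition, same cost).


-- ===== PORT A =====
-- loop of A: state = (accumulated sub_query, is_multiple_line_query flag)
def aLoop (fun_use : String) : List String → List String → Bool → List String
  | [], acc, _ => acc
  | line :: rest, acc, flag =>
    let c := PySem.Str.strip line
    if (PySem.Str.startswith c "-- QUERY" && PySem.Str.isIn fun_use c) || flag then
      aLoop fun_use rest (acc ++ [c]) (!PySem.Str.endswith c ";")
    else
      aLoop fun_use rest acc flag

def get_sub_query (queries : String) (fun_use : String) : String :=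
  PySem.Str.join "\n" (aLoop fun_use (PySem.Str.splitlines queries) [] false)

-- ===== PORT B =====
-- B pre-strips the lines, then runs an outer header scan (bOuter) with a nested
-- continuation loop (bInner) that copies lines until one ends with ';'.
mutual
def bOuter (fun_use : String) : List String → List String
  | [] => []
  | c :: rest =>
    if PySem.Str.startswith c "-- QUERY" && PySem.Str.isIn fun_use c then
      if PySem.Str.endswith c ";" then c :: bOuter fun_use rest
      else c :: bInner fun_use rest
    else bOuter fun_use rest

def bInner (fun_use : String) : List String → List String
  | [] => []
  | c :: rest =>
    if PySem.Str.endswith c ";" then c :: bOuter fun_use rest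
    else c :: bInner fun_use rest
end

def get_sub_query_alt (queries : String) (fun_use : String) : String :=
  PySem.Str.join "\n" (bOuter fun_use ((PySem.Str.splitlines queries).map PySem.Str.strip))

-- ===== PRECONDITION & SPEC =====
def Spec_get_sub_query (queries : String) (fun_use : String) (out : String) : Prop := out = get_sub_query_alt queries fun_use
instance (queries : String) (fun_use : String) (out : String) : Decidable (Spec_get_sub_query queries fun_use out) := by unfold Spec_get_sub_query; infer_instance

-- ===== CLAIM (what is proved, stated in full; the proofs are below) =====
def Claim_equal_get_sub_query : Prop := ∀ (queries : String) (fun_use : String), Dom_get_sub_query queries fun_use → Spec_get_sub_query queries fun_use (get_sub_query queries fun_use)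

-- ===== LEMMAS AND PROOFS =====

-- A's flat flag-scan equals B's nested header/continuation scan: flag=false tracks
-- bOuter, flag=true tracks bInner, with the accumulator factored out.
theorem aLoop_eq (fun_use : String) (lines : List String) :
    (∀ acc, aLoop fun_use lines acc false = acc ++ bOuter fun_use (lines.map PySem.Str.strip)) ∧
    (∀ acc, aLoop fun_use lines acc true = acc ++ bInner fun_use (lines.map PySem.Str.strip)) := by
  induction lines with
  | nil => simp [aLoop, bOuter, bInner]
  | cons l rest ih =>
    obtain ⟨ihF, ihT⟩ := ih
    constructor <;> intro acc <;>
      simp only [aLoop, bOuter, bInner, List.map_cons] <;>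
      split_ifs with h1 h2 <;>
      simp_all

-- ===== VERDICT (by name: the statement is the Claim_ definition above) =====
theorem get_sub_query_spec : Claim_equal_get_sub_query := by
  intro queries fun_use _
  unfold Spec_get_sub_query get_sub_query get_sub_query_alt
  rw [(aLoop_eq fun_use (PySem.Str.splitlines queries)).1 []]
  simp
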